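-- pv_equiv track=rewrite | github.com/AlanElPlatano/Orpheus | midi_parser/core/token_reorderer.py | _split_into_bars
-- ===== SOURCE A (Python) =====
-- from typing import Dict, List, Tuple, Set
--
-- def _split_into_bars(tokens: List[int], bar_id: int) -> List[List[int]]:
--     """
--     Split a flat token sequence into per-bar segments.
--
--     Each segment starts with the Bar token. Tokens before the first Bar
--     (if any) are placed in the first segment.
--     """
--     bars = []
--     current_bar = []
--
--     for token in tokens:
--         if token == bar_id and current_bar:
--             bars.append(current_bar)
--             current_bar = [token]
--         else:
--             current_bar.append(token)
--
--     if current_bar: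
--         bars.append(current_bar)
--
--     return bars
-- ===== SOURCE B (Python) =====
-- from typing import List
--
-- def _split_into_bars(tokens: List[int], bar_id: int) -> List[List[int]]:
--     """Recursive decomposition: peel off one segment (head token plus the run
--     of following non-bar tokens), then recurse on the remainder."""
--     if not tokens:
--         return []
--     i = 1
--     while i < len(tokens) and tokens[i] != bar_id:
--         i += 1
--     return [tokens[:i]] + _split_into_bars(tokens[i:], bar_id)
-- ===== Notes on version B (the rewrite author's own statement) =====
-- stated objective: alternative
-- what changed: Replaces the streaming flush-on-boundary accumulator loop with a recursive decomposition that peels one whole segment at a time (head token plus the run of following non-bar tokens) and recurses on the rest.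
import Mathlib
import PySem

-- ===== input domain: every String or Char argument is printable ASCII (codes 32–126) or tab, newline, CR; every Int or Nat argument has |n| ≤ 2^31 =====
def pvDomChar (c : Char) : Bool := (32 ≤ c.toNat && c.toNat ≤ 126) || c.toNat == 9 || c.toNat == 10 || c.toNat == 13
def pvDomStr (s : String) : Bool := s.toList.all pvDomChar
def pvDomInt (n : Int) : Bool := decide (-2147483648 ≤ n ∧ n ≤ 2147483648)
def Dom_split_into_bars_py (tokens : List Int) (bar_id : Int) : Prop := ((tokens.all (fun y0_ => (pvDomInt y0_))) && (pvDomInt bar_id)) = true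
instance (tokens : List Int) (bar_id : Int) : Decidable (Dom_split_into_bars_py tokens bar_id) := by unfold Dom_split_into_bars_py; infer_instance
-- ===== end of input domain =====

-- B replaces A's streaming flush-on-boundary accumulator loop by a recursive
-- decomposition that peels one whole segment at a time; same cost, alternative structure.

-- ===== PORT A =====
-- A's loop state is the pair (bars, current_bar); the trailing 'if current_bar: bars.append' is the final if.
def split_into_bars_py (tokens : List Int) (bar_id : Int) : List (List Int) :=
  let st := tokens.foldl
    (fun (s : List (List Int) × List Int) token =>
      if token = bar_id ∧ s.2 ≠ [] then (s.1 ++ [s.2], [token]) else (s.1, s.2 ++ [token]))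
    ([], [])
  if st.2 ≠ [] then st.1 ++ [st.2] else st.1

-- ===== PORT B =====
-- Source B: the while loop scans the run of non-bar tokens after the head (takeWhile),
-- tokens[:i] is the head plus that run, tokens[i:] is the rest (dropWhile); then recurse.
def split_into_bars_py_alt (tokens : List Int) (bar_id : Int) : List (List Int) :=
  match tokens with
  | [] => []
  | t :: rest =>
    (t :: rest.takeWhile (fun x => x ≠ bar_id)) ::
      split_into_bars_py_alt (rest.dropWhile (fun x => x ≠ bar_id)) bar_id
termination_by tokens.length
decreasing_by
  exact Nat.lt_succ_of_le (List.length_dropWhile_le _ _)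

-- ===== PRECONDITION & SPEC =====
def Spec_split_into_bars_py (tokens : List Int) (bar_id : Int) (out : List (List Int)) : Prop := out = split_into_bars_py_alt tokens bar_id
instance (tokens : List Int) (bar_id : Int) (out : List (List Int)) : Decidable (Spec_split_into_bars_py tokens bar_id out) := by unfold Spec_split_into_bars_py; infer_instance

-- ===== CLAIM (what is proved, stated in full; the proofs are below) =====
def Claim_equal_split_into_bars_py : Prop := ∀ (tokens : List Int) (bar_id : Int), Dom_split_into_bars_py tokens bar_id → Spec_split_into_bars_py tokens bar_id (split_into_bars_py tokens bar_id)

-- ===== LEMMAS AND PROOFS =====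

-- Proof-side names for A's loop body and final flush (definitionally equal to the port).
def pvStep (bar_id : Int) (s : List (List Int) × List Int) (token : Int) : List (List Int) × List Int :=
  if token = bar_id ∧ s.2 ≠ [] then (s.1 ++ [s.2], [token]) else (s.1, s.2 ++ [token])

def pvFin (st : List (List Int) × List Int) : List (List Int) :=
  if st.2 ≠ [] then st.1 ++ [st.2] else st.1

-- Invariant of A's loop: from a non-empty current segment `cur`, the flushed
-- result is `bars`, then `cur` extended by the run of non-bar tokens, then B's
-- segments of the remainder.
theorem foldl_split_inv (bar_id : Int) (ts : List Int) :
    ∀ (bars : List (List Int)) (cur : List Int), cur ≠ [] →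
    pvFin (ts.foldl (pvStep bar_id) (bars, cur))
      = bars ++ (cur ++ ts.takeWhile (fun x => x ≠ bar_id)) ::
          split_into_bars_py_alt (ts.dropWhile (fun x => x ≠ bar_id)) bar_id := by
  induction ts with
  | nil =>
    intro bars cur hcur
    simp [pvFin, hcur, split_into_bars_py_alt]
  | cons t ts ih =>
    intro bars cur hcur
    by_cases ht : t = bar_id
    · rw [List.foldl_cons, show pvStep bar_id (bars, cur) t = (bars ++ [cur], [t]) from by
        simp [pvStep, ht, hcur]]
      rw [ih (bars ++ [cur]) [t] (by simp)]
      subst ht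
      simp [List.takeWhile, List.dropWhile, split_into_bars_py_alt]
    · rw [List.foldl_cons, show pvStep bar_id (bars, cur) t = (bars, cur ++ [t]) from by
        simp [pvStep, ht]]
      rw [ih bars (cur ++ [t]) (by simp)]
      simp [List.takeWhile, List.dropWhile, ht]

-- ===== VERDICT (by name: the statement is the Claim_ definition above) =====
theorem split_into_bars_py_spec : Claim_equal_split_into_bars_py := by
  intro tokens bar_id _
  show split_into_bars_py tokens bar_id = split_into_bars_py_alt tokens bar_id
  have hdef : split_into_bars_py tokens bar_id
      = pvFin (tokens.foldl (pvStep bar_id) ([], [])) := rfl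
  cases tokens with
  | nil => simp [split_into_bars_py, split_into_bars_py_alt]
  | cons t ts =>
    rw [hdef, List.foldl_cons, show pvStep bar_id ([], []) t = ([], [t]) from by
      simp [pvStep]]
    rw [foldl_split_inv bar_id ts [] [t] (by simp)]
    simp [split_into_bars_py_alt]
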